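-- pv_equiv track=rewrite | github.com/ryangohca/Escape-Room-Text-Game | minigames.py | count_occurances_in_matrix
-- ===== SOURCE A (Python) =====
-- def count_occurances_in_matrix(bigger, smaller):
--     """Counts the number of times the smaller matrix is in the bigger matrix. '-' in
--     the smaller matrix represents that it could represent anything. Does not check
--     whether both matrixes are valid matrixes.
--
--     Time complexity: O(N^4) as we are not expecting `bigger` to be more than 50x50.
--
--     Args:
--         bigger (2d list): The bigget matrix to search in.
--         smaller (2d list): The smaller matrix to find in the larger one.
--     Returns:
--         int: Number of times `smaller` is found inside `larger`.
--     """
--     if len(bigger) < len(smaller):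
--         # The smaller matrix height is greater than the bigger matrix height.
--         return 0
--     elif len(bigger[0]) < len(smaller[0]):
--         # The smaller matrix length is greater than the bigger matrix length.
--         return 0
--     # Check every possible starting position of the smaller matrix (i1, j1)
--     # in the bigger matrix.
--     numOccurance = 0
--     for i1 in range(len(bigger) - len(smaller) + 1):
--         for j1 in range(len(bigger[i1]) - len(smaller[0]) + 1):
--             idxi = 0
--             found = True
--             for i2 in range(i1, i1 + len(smaller)):
--                 idxj = 0
--                 for j2 in range(j1, j1 + len(smaller[0])):
--                     if smaller[idxi][idxj] == '-':
--                         idxj += 1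
--                         continue
--                     if bigger[i2][j2] != smaller[idxi][idxj]:
--                         found = False
--                     idxj += 1
--                 idxi+=1
--             if found:
--                 numOccurance += 1
--     return numOccurance
-- ===== SOURCE B (Python) =====
-- def count_occurances_in_matrix(bigger, smaller):
--     """Same count as A, but via a precomputed row-match table: rowmatch[bi][si][j1]
--     says whether smaller's row si matches bigger's row bi at column offset j1."""
--     if len(bigger) < len(smaller):
--         return 0
--     elif len(bigger[0]) < len(smaller[0]):
--         return 0
--     H, W = len(bigger), len(bigger[0])
--     h, w = len(smaller), len(smaller[0])
--     rowmatch = [[[all(c == '-' or brow[j1 + k] == c for k, c in enumerate(srow))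
--                   for j1 in range(W - w + 1)]
--                  for srow in smaller]
--                 for brow in bigger]
--     return sum(1
--                for i1 in range(H - h + 1)
--                for j1 in range(W - w + 1)
--                if all(rowmatch[i1 + si][si][j1] for si in range(h)))
-- ===== Notes on version B (the rewrite author's own statement) =====
-- stated objective: alternative
-- what changed: Replaces A's four nested index loops with mutable idxi/idxj counters and a found flag by a precomputed 3D row-match table (row of smaller vs row of bigger at each column offset) combined per candidate position with all()/sum().
-- outside the precondition, e.g. on count_occurances_in_matrix([['a', 'b'], ['c']], [['a']]): A returns 1, B raises IndexError
import Mathlib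
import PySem

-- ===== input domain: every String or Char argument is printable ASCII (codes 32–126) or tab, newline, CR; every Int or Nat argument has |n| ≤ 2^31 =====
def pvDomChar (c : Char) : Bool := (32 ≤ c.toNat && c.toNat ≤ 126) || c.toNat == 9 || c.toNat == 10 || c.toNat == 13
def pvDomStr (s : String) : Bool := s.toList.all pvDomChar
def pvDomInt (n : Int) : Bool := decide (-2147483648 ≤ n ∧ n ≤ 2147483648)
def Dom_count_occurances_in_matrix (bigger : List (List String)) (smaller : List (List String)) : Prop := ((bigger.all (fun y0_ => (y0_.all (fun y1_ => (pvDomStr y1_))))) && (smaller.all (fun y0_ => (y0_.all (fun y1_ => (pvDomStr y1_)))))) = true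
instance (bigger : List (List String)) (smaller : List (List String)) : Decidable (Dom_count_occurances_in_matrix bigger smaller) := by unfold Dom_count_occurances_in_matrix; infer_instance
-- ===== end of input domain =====

-- B replaces A's four nested index loops (mutable idxi/idxj counters, found flag) by a
-- precomputed row-match table combined per candidate position with all()/sum(); same cost.

-- ===== PORT A =====
def count_occurances_in_matrix (bigger : List (List String)) (smaller : List (List String)) : Int :=
  if PySem.List.len bigger < PySem.List.len smaller then 0
  else if PySem.List.len (PySem.List.pyGetD bigger 0 []) < PySem.List.len (PySem.List.pyGetD smaller 0 []) then 0
  else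
    (PySem.List.pyRange 0 (PySem.List.len bigger - PySem.List.len smaller + 1) 1).foldl
      (fun numOccurance i1 =>
        (PySem.List.pyRange 0 (PySem.List.len (PySem.List.pyGetD bigger i1 []) - PySem.List.len (PySem.List.pyGetD smaller 0 []) + 1) 1).foldl
          (fun numOccurance j1 =>
            -- state: (idxi, found)
            let st :=
              (PySem.List.pyRange i1 (i1 + PySem.List.len smaller) 1).foldl
                (fun (st : Int × Bool) i2 =>
                  -- inner state: (idxj, found)
                  let inner :=
                    (PySem.List.pyRange j1 (j1 + PySem.List.len (PySem.List.pyGetD smaller 0 [])) 1).foldl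
                      (fun (st2 : Int × Bool) j2 =>
                        if PySem.List.pyGetD (PySem.List.pyGetD smaller st.1 []) st2.1 "" == "-" then
                          (st2.1 + 1, st2.2)
                        else if PySem.List.pyGetD (PySem.List.pyGetD bigger i2 []) j2 "" != PySem.List.pyGetD (PySem.List.pyGetD smaller st.1 []) st2.1 "" then
                          (st2.1 + 1, false)
                        else (st2.1 + 1, st2.2))
                      ((0 : Int), st.2)
                  (st.1 + 1, inner.2))
                ((0 : Int), true)
            if st.2 then numOccurance + 1 else numOccurance)
          numOccurance)
      0

-- ===== PORT B =====
def count_occurances_in_matrix_alt (bigger : List (List String)) (smaller : List (List String)) : Int :=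
  if PySem.List.len bigger < PySem.List.len smaller then 0
  else if PySem.List.len (PySem.List.pyGetD bigger 0 []) < PySem.List.len (PySem.List.pyGetD smaller 0 []) then 0
  else
    let H : Int := PySem.List.len bigger
    let W : Int := PySem.List.len (PySem.List.pyGetD bigger 0 [])
    let h : Int := PySem.List.len smaller
    let w : Int := PySem.List.len (PySem.List.pyGetD smaller 0 [])
    let rowmatch : List (List (List Bool)) :=
      bigger.map (fun brow =>
        smaller.map (fun srow =>
          (PySem.List.pyRange 0 (W - w + 1) 1).map (fun j1 =>
            (PySem.List.enumerate srow 0).all (fun kc =>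
              kc.2 == "-" || PySem.List.pyGetD brow (j1 + kc.1) "" == kc.2))))
    ((PySem.List.pyRange 0 (H - h + 1) 1).map (fun i1 =>
      ((PySem.List.pyRange 0 (W - w + 1) 1).countP (fun j1 =>
        (PySem.List.pyRange 0 h 1).all (fun si =>
          PySem.List.pyGetD (PySem.List.pyGetD (PySem.List.pyGetD rowmatch (i1 + si) []) si []) j1 false)) : Int))).sum

-- ===== PRECONDITION & SPEC =====
-- Pre_ excludes exactly (i) empty `smaller` (A raises IndexError at smaller[0]) and
-- (ii) ragged (non-rectangular) matrices once both size guards pass (A then either raises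
-- IndexError or its per-row j1 range is an accident of raggedness); matrices are the
-- function's stated domain ("2d list"), and A's early guards are kept inside Pre_.
def Pre_count_occurances_in_matrix (bigger : List (List String)) (smaller : List (List String)) : Prop :=
  smaller ≠ [] ∧
  (bigger.length < smaller.length ∨
    ((bigger.headD []).length < (smaller.headD []).length ∨
      ((∀ r ∈ bigger, r.length = (bigger.headD []).length) ∧
       (∀ r ∈ smaller, r.length = (smaller.headD []).length))))
instance (bigger : List (List String)) (smaller : List (List String)) : Decidable (Pre_count_occurances_in_matrix bigger smaller) := by unfold Pre_count_occurances_in_matrix; infer_instance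

def pvWitness_count_occurances_in_matrix : List (List String) × List (List String) :=
  ([["a", "b"], ["b", "a"]], [["-", "a"]])

def Spec_count_occurances_in_matrix (bigger : List (List String)) (smaller : List (List String)) (out : Int) : Prop := out = count_occurances_in_matrix_alt bigger smaller
instance (bigger : List (List String)) (smaller : List (List String)) (out : Int) : Decidable (Spec_count_occurances_in_matrix bigger smaller out) := by unfold Spec_count_occurances_in_matrix; infer_instance

-- ===== CLAIM (what is proved, stated in full; the proofs are below) =====
def Claim_equal_count_occurances_in_matrix : Prop := ∀ (bigger : List (List String)) (smaller : List (List String)), Dom_count_occurances_in_matrix bigger smaller → Pre_count_occurances_in_matrix bigger smaller → Spec_count_occurances_in_matrix bigger smaller (count_occurances_in_matrix bigger smaller)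

-- ===== LEMMAS AND PROOFS =====

-- canonical per-row check: smaller row `srow` matches bigger row `brow` at column offset j1
def rowOKA (brow srow : List String) (j1 : Int) (w : Nat) : Bool :=
  (List.range w).all (fun k =>
    (PySem.List.pyGetD srow (k : Int) "" == "-") ||
    (PySem.List.pyGetD brow (j1 + (k : Int)) "" == PySem.List.pyGetD srow (k : Int) ""))

-- A's innermost column loop computes `found && <row check>` and advances idxj by w
lemma colLoop (srow brow : List String) :
    ∀ (n : Nat) (j1 idx0 : Int) (f0 : Bool),
    (PySem.List.pyRange j1 (j1 + (n : Int)) 1).foldl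
      (fun (st2 : Int × Bool) j2 =>
        if PySem.List.pyGetD srow st2.1 "" == "-" then (st2.1 + 1, st2.2)
        else if PySem.List.pyGetD brow j2 "" != PySem.List.pyGetD srow st2.1 "" then (st2.1 + 1, false)
        else (st2.1 + 1, st2.2))
      (idx0, f0)
    = (idx0 + (n : Int), f0 && (List.range n).all (fun k =>
        (PySem.List.pyGetD srow (idx0 + (k : Int)) "" == "-") ||
        (PySem.List.pyGetD brow (j1 + (k : Int)) "" == PySem.List.pyGetD srow (idx0 + (k : Int)) ""))) := by
  intro n
  induction n with
  | zero => intro j1 idx0 f0; simp [PySem.List.pyRange_one_eq_nil]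
  | succ n ih =>
    intro j1 idx0 f0
    rw [PySem.List.pyRange_one_cons (by push_cast; omega), List.foldl_cons]
    rw [show j1 + ((n+1 : Nat) : Int) = (j1 + 1) + (n : Int) by push_cast; ring]
    have hstep : (if PySem.List.pyGetD srow idx0 "" == "-" then (idx0 + 1, f0)
        else if PySem.List.pyGetD brow j1 "" != PySem.List.pyGetD srow idx0 "" then (idx0 + 1, false)
        else (idx0 + 1, f0))
        = (idx0 + 1, f0 && ((PySem.List.pyGetD srow idx0 "" == "-") ||
            (PySem.List.pyGetD brow j1 "" == PySem.List.pyGetD srow idx0 ""))) := by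
      cases hc : (PySem.List.pyGetD srow idx0 "" == "-") <;>
        cases hb : (PySem.List.pyGetD brow j1 "" == PySem.List.pyGetD srow idx0 "") <;>
          simp [hb, bne]
    rw [hstep, ih]
    rw [Prod.mk.injEq]
    refine ⟨by push_cast; ring, ?_⟩
    · rw [List.range_succ_eq_map]
      simp only [List.all_cons, List.all_map, Bool.and_assoc, Nat.cast_zero, add_zero,
        Function.comp_def]
      congr 2
      apply congrArg
      funext k
      push_cast
      ring_nf

-- A's row loop computes `found && all rows match` and advances idxi by h
lemma rowLoop (bigger smaller : List (List String)) (j1 : Int) (wn : Nat) :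
    ∀ (m : Nat) (i1 idx0 : Int) (f0 : Bool),
    (PySem.List.pyRange i1 (i1 + (m : Int)) 1).foldl
      (fun (st : Int × Bool) i2 =>
        (st.1 + 1,
          ((PySem.List.pyRange j1 (j1 + (wn : Int)) 1).foldl
            (fun (st2 : Int × Bool) j2 =>
              if PySem.List.pyGetD (PySem.List.pyGetD smaller st.1 []) st2.1 "" == "-" then (st2.1 + 1, st2.2)
              else if PySem.List.pyGetD (PySem.List.pyGetD bigger i2 []) j2 "" != PySem.List.pyGetD (PySem.List.pyGetD smaller st.1 []) st2.1 "" then (st2.1 + 1, false)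
              else (st2.1 + 1, st2.2))
            ((0 : Int), st.2)).2))
      (idx0, f0)
    = (idx0 + (m : Int), f0 && (List.range m).all (fun si =>
        rowOKA (PySem.List.pyGetD bigger (i1 + (si : Int)) []) (PySem.List.pyGetD smaller (idx0 + (si : Int)) []) j1 wn)) := by
  intro m
  induction m with
  | zero => intro i1 idx0 f0; simp [PySem.List.pyRange_one_eq_nil]
  | succ m ih =>
    intro i1 idx0 f0
    rw [PySem.List.pyRange_one_cons (a := i1) (b := i1 + ((m+1 : Nat) : Int)) (by push_cast; omega),
      List.foldl_cons]
    rw [show i1 + ((m+1 : Nat) : Int) = (i1 + 1) + (m : Int) by push_cast; ring]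
    rw [show (((idx0, f0) : Int × Bool).1 + 1,
          ((PySem.List.pyRange j1 (j1 + (wn : Int)) 1).foldl
            (fun (st2 : Int × Bool) j2 =>
              if PySem.List.pyGetD (PySem.List.pyGetD smaller ((idx0, f0) : Int × Bool).1 []) st2.1 "" == "-" then (st2.1 + 1, st2.2)
              else if PySem.List.pyGetD (PySem.List.pyGetD bigger i1 []) j2 "" != PySem.List.pyGetD (PySem.List.pyGetD smaller ((idx0, f0) : Int × Bool).1 []) st2.1 "" then (st2.1 + 1, false)
              else (st2.1 + 1, st2.2))
            ((0 : Int), ((idx0, f0) : Int × Bool).2)).2)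
        = (idx0 + 1, f0 && rowOKA (PySem.List.pyGetD bigger i1 []) (PySem.List.pyGetD smaller idx0 []) j1 wn) by
      rw [colLoop (PySem.List.pyGetD smaller idx0 []) (PySem.List.pyGetD bigger i1 []) wn j1 0 f0]
      simp [rowOKA]]
    rw [ih]
    rw [Prod.mk.injEq]
    refine ⟨by push_cast; ring, ?_⟩
    · rw [List.range_succ_eq_map]
      simp only [List.all_cons, List.all_map, Bool.and_assoc, Nat.cast_zero, add_zero,
        Function.comp_def]
      congr 2
      apply congrArg
      funext si
      push_cast
      ring_nf

lemma getD0_eq_headD {α : Type} (xs : List α) (d : α) :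
    PySem.List.pyGetD xs 0 d = xs.headD d := by
  cases xs <;> simp [PySem.List.pyGetD_zero]

-- `List.all` congruence from agreement on members (Mathlib's List.all_congr needs agreement everywhere)
lemma all_congr_mem {α : Type} {l : List α} {p q : α → Bool}
    (h : ∀ a ∈ l, p a = q a) : l.all p = l.all q := by
  induction l with
  | nil => rfl
  | cons a t ih =>
    simp only [List.all_cons, h a (by simp), ih (fun b hb => h b (by simp [hb]))]

-- looking up B's precomputed rowmatch table at (row i, smaller-row si, offset j)
lemma rowmatch_lookup (bigger smaller : List (List String)) (W w : Int) (i j : Int) (si : Nat)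
    (hi0 : 0 ≤ i) (hi : i.toNat < bigger.length) (hsi : si < smaller.length)
    (hj0 : 0 ≤ j) (hj : j < W - w + 1) :
    PySem.List.pyGetD (PySem.List.pyGetD (PySem.List.pyGetD
      (List.map (fun brow => List.map (fun srow =>
        List.map (fun j1 => (PySem.List.enumerate srow).all fun kc =>
            kc.2 == "-" || PySem.List.pyGetD brow (j1 + kc.1) "" == kc.2)
          (PySem.List.pyRange 0 (W - w + 1))) smaller) bigger) i []) (↑si) []) j false
    = (PySem.List.enumerate (smaller[si]'hsi)).all (fun kc =>
        kc.2 == "-" || PySem.List.pyGetD (bigger[i.toNat]'hi) (j + kc.1) "" == kc.2) := by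
  rw [PySem.List.pyGetD_eq_getElem _ _ hi0 (by simp only [List.length_map]; omega)]
  simp only [List.getElem_map]
  rw [PySem.List.pyGetD_natCast, List.getD_eq_getElem _ _ (by simpa using hsi)]
  simp only [List.getElem_map]
  rw [PySem.List.pyGetD_map_pyRange_of_nonneg _ _ _ _ hj0 hj]

-- A, past its two guards, equals a sum over i1 of a count over j1 of the canonical check
lemma main_eq (bigger smaller : List (List String))
    (hs : smaller ≠ [])
    (h1 : ¬ PySem.List.len bigger < PySem.List.len smaller)
    (h2 : ¬ PySem.List.len (PySem.List.pyGetD bigger 0 []) < PySem.List.len (PySem.List.pyGetD smaller 0 []))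
    (hrB : ∀ r ∈ bigger, r.length = (PySem.List.pyGetD bigger 0 []).length)
    (hrS : ∀ r ∈ smaller, r.length = (PySem.List.pyGetD smaller 0 []).length) :
    count_occurances_in_matrix bigger smaller = count_occurances_in_matrix_alt bigger smaller := by
  unfold count_occurances_in_matrix count_occurances_in_matrix_alt
  rw [if_neg h1, if_neg h1, if_neg h2, if_neg h2]
  simp only [PySem.List.len_eq]
  simp only [rowLoop, Bool.true_and, zero_add, PySem.List.foldl_count_if, PySem.List.foldl_add,
    zero_add]
  have hh : 0 < smaller.length := List.length_pos_of_ne_nil hs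
  have h1' : smaller.length ≤ bigger.length := by
    have := not_lt.mp h1; simpa [PySem.List.len_eq] using this
  have h2' : (PySem.List.pyGetD smaller 0 []).length ≤ (PySem.List.pyGetD bigger 0 []).length := by
    have := not_lt.mp h2; simpa [PySem.List.len_eq] using this
  refine congrArg List.sum (List.map_congr_left ?_)
  intro i1 hi1
  rw [PySem.List.mem_pyRange_one] at hi1
  have hi1n : i1 < (bigger.length : Int) := by omega
  have hbi : PySem.List.pyGetD bigger i1 [] = bigger[i1.toNat]'(by omega) :=
    PySem.List.pyGetD_eq_getElem _ _ hi1.1 (by omega)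
  rw [hbi, hrB _ (List.getElem_mem _)]
  refine congrArg _ (List.countP_congr ?_)
  intro j1 hj1
  rw [PySem.List.mem_pyRange_one] at hj1
  suffices hpt :
      ((List.range smaller.length).all fun si =>
        rowOKA (PySem.List.pyGetD bigger (i1 + ↑si) []) (PySem.List.pyGetD smaller (↑si) []) j1
          (PySem.List.pyGetD smaller 0 []).length)
      = ((PySem.List.pyRange 0 ↑smaller.length).all fun si =>
          PySem.List.pyGetD
            (PySem.List.pyGetD
              (PySem.List.pyGetD
                (List.map
                  (fun brow =>
                    List.map
                      (fun srow =>
                        List.map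
                          (fun j1 =>
                            (PySem.List.enumerate srow).all fun kc =>
                              kc.2 == "-" || PySem.List.pyGetD brow (j1 + kc.1) "" == kc.2)
                          (PySem.List.pyRange 0
                            (↑(PySem.List.pyGetD bigger 0 []).length -
                                ↑(PySem.List.pyGetD smaller 0 []).length + 1)))
                      smaller)
                  bigger)
                (i1 + si) [])
              si [])
            j1 false) by
    rw [hpt]
  rw [PySem.List.pyRange_zero_natCast, List.all_map]
  refine all_congr_mem ?_
  intro si hsi
  rw [List.mem_range] at hsi
  simp only [Function.comp_apply]
  rw [rowmatch_lookup bigger smaller _ _ (i1 + ↑si) j1 si (by omega) (by omega) hsi hj1.1 hj1.2]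
  rw [PySem.List.enumerate_eq_map_pyRange _ "", List.all_map, PySem.List.len_eq,
    hrS _ (List.getElem_mem _), PySem.List.pyRange_zero_natCast, List.all_map]
  simp only [rowOKA, Function.comp_def]
  rw [PySem.List.pyGetD_eq_getElem bigger [] (by omega) (by omega),
    PySem.List.pyGetD_natCast, List.getD_eq_getElem _ _ hsi]

-- ===== VERDICT (by name: the statement is the Claim_ definition above) =====
theorem count_occurances_in_matrix_spec : Claim_equal_count_occurances_in_matrix := by
  intro bigger smaller _hdom hpre
  obtain ⟨hs, hcase⟩ := hpre
  unfold Spec_count_occurances_in_matrix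
  by_cases h1 : PySem.List.len bigger < PySem.List.len smaller
  · unfold count_occurances_in_matrix count_occurances_in_matrix_alt
    rw [if_pos h1, if_pos h1]
  by_cases h2 : PySem.List.len (PySem.List.pyGetD bigger 0 []) < PySem.List.len (PySem.List.pyGetD smaller 0 [])
  · unfold count_occurances_in_matrix count_occurances_in_matrix_alt
    rw [if_neg h1, if_neg h1, if_pos h2, if_pos h2]
  · have hhead : ∀ (xs : List (List String)), PySem.List.pyGetD xs 0 ([] : List String) = xs.headD [] :=
      fun xs => getD0_eq_headD xs []
    rcases hcase with hc | hc | hc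
    · exact absurd (by simp only [PySem.List.len_eq]; exact_mod_cast hc) h1
    · exact absurd (by simp only [PySem.List.len_eq, hhead]; exact_mod_cast hc) h2
    · exact main_eq bigger smaller hs h1 h2
        (by rw [hhead]; exact hc.1) (by rw [hhead]; exact hc.2)
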